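-- pv_equiv track=rewrite | github.com/matus-pikuliak/advent_2023 | 13/01.py | horizontal_mirror
-- ===== SOURCE A (Python) =====
-- def horizontal_mirror(rows):
--     nums = [
--         sum(
--             (2 * (c == '#')) ** (i + 1)
--             for i, c in enumerate(row)
--         )
--         for row in rows
--     ]
--     for x in range(len(nums) // 2, 0, -1):
--         if nums[:x] == nums[x:2*x][::-1]:
--             yield x
-- ===== SOURCE B (Python) =====
-- def horizontal_mirror(rows):
--     # Same row encoding as A, but the mirror positions are found by the
--     # KMP prefix-function (failure-link) border machinery instead of per-x
--     # slice comparisons: a prefix nums[:2x] is a mirror iff 2x is a border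
--     # of t = nums + [sep] + reversed(nums) (sep occurs nowhere else), and
--     # the border chain of t, followed from the longest border, enumerates
--     # all borders in decreasing order in O(n) total.
--     nums = [
--         sum(
--             (2 * (c == '#')) ** (i + 1)
--             for i, c in enumerate(row)
--         )
--         for row in rows
--     ]
--     t = nums + [None] + nums[::-1]
--     m = len(t)
--     f = [0]
--     for i in range(1, m):
--         k = f[i - 1]
--         while k and t[i] != t[k]:
--             k = f[k - 1]
--         if t[i] == t[k]:
--             k += 1
--         f.append(k)
--     length = f[m - 1]
--     while length:
--         if length % 2 == 0:
--             yield length // 2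
--         length = f[length - 1]
-- ===== Notes on version B (the rewrite author's own statement) =====
-- stated objective: faster
-- what changed: B keeps A's row encoding but replaces A's per-candidate slice-build-and-reverse comparisons by the KMP prefix-function of nums+[None]+reversed(nums), whose failure-link border chain enumerates exactly the even palindromic prefixes (the mirror positions) in descending order.
import Mathlib
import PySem

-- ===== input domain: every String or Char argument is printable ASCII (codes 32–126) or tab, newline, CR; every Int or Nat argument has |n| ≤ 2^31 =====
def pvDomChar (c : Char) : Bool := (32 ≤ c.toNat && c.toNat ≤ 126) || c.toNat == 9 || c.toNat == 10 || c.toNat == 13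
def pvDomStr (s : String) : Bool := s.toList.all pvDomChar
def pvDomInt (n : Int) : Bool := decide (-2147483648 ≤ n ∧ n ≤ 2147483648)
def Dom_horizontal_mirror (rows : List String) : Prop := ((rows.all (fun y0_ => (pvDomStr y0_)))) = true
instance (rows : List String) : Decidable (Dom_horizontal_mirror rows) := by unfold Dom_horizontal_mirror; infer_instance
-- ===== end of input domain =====

-- B finds the mirror positions by the KMP prefix-function border chain of
-- nums + [None] + reversed(nums) instead of A's per-candidate slice comparisons
-- (objective: faster, measured; both are generators, ported
-- as the list of yielded values).

-- ===== PORT A =====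
-- sum((2 * (c == '#')) ** (i + 1) for i, c in enumerate(row))  (shared by both Pythons verbatim)
def hmNum (row : String) : Int :=
  (PySem.List.enumerate row.toList 0).foldl
    (fun acc ic => acc + (2 * (if ic.2 == '#' then (1 : Int) else 0)) ^ (ic.1 + 1).toNat) 0

-- the generator, consumed in order; nums[x:2*x][::-1] is reverse (PySem.List.slice?_none_none_neg_one)
def horizontal_mirror (rows : List String) : List Int :=
  let nums := rows.map hmNum
  (PySem.List.pyRange (PySem.Int.floordiv (nums.length : Int) 2) 0 (-1)).foldl
    (fun acc x =>
      if PySem.List.slice nums (some 0) (some x) =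
          (PySem.List.slice nums (some x) (some (2 * x))).reverse
      then acc ++ [x] else acc) []

-- ===== PORT B =====
-- while k and t[i] != t[k]: k = f[k-1]   (the 'min … (k-1)' is only a totality
-- guard: the invariant f[j] ≤ j proved below makes it exact)
def kmpFall (t : List (Option Int)) (f : List Nat) (c : Option Int) (k : Nat) : Nat :=
  if k ≠ 0 ∧ ¬(t.getD k none == c) then
    kmpFall t f c (min (f.getD (k - 1) 0) (k - 1))
  else k
termination_by k
decreasing_by omega

-- body of 'for i in range(1, m)': k = f[i-1]; while …; if t[i] == t[k]: k += 1; f.append(k)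
def kmpStep (t : List (Option Int)) (f : List Nat) (i : Nat) : Nat :=
  let r := kmpFall t f (t.getD i none) (f.getD (i - 1) 0)
  if t.getD i none == t.getD r none then r + 1 else r

def kmpAux (t : List (Option Int)) (f : List Nat) (i : Nat) : Nat → List Nat
  | 0 => f
  | steps + 1 => kmpAux t (f ++ [kmpStep t f i]) (i + 1) steps

-- f = [0]; for i in range(1, m): …
def kmpBuild (t : List (Option Int)) : List Nat :=
  kmpAux t [0] 1 (t.length - 1)

-- length = f[m-1]; while length: yield length//2 if even; length = f[length-1]
-- ('min … (L-1)' again only a totality guard, exact under f[j] ≤ j)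
def hmChain (f : List Nat) (L : Nat) : List Int :=
  if L = 0 then []
  else (if L % 2 = 0 then [((L / 2 : Nat) : Int)] else []) ++
    hmChain f (min (f.getD (L - 1) 0) (L - 1))
termination_by L
decreasing_by omega

def horizontal_mirror_alt (rows : List String) : List Int :=
  let nums := rows.map hmNum
  -- t = nums + [None] + nums[::-1], embedded as Option Int with None ↦ none
  let t : List (Option Int) := nums.map some ++ [none] ++ (nums.map some).reverse
  let f := kmpBuild t
  hmChain f (f.getD (t.length - 1) 0)

-- ===== PRECONDITION & SPEC =====
def Spec_horizontal_mirror (rows : List String) (out : List Int) : Prop := out = horizontal_mirror_alt rows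
instance (rows : List String) (out : List Int) : Decidable (Spec_horizontal_mirror rows out) := by unfold Spec_horizontal_mirror; infer_instance

-- ===== CLAIM (what is proved, stated in full; the proofs are below) =====
def Claim_equal_horizontal_mirror : Prop := ∀ (rows : List String), Dom_horizontal_mirror rows → Spec_horizontal_mirror rows (horizontal_mirror rows)

-- ===== LEMMAS AND PROOFS =====

-- a (possibly empty) proper border of s: prefix of length L = suffix of length L
abbrev isBorder (s : List (Option Int)) (L : Nat) : Prop :=
  L < s.length ∧ s.take L = s.drop (s.length - L)

-- the longest proper border
def bmax (s : List (Option Int)) : Nat :=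
  Nat.findGreatest (fun L => isBorder s L) (s.length - 1)

lemma isBorder_zero (s : List (Option Int)) (hs : s ≠ []) : isBorder s 0 := by
  refine ⟨List.length_pos_of_ne_nil hs, ?_⟩
  simp

lemma isBorder_bmax (s : List (Option Int)) (hs : s ≠ []) : isBorder s (bmax s) := by
  exact Nat.findGreatest_spec (Nat.zero_le _) (isBorder_zero s hs)

lemma le_bmax_of_isBorder {s : List (Option Int)} {j : Nat} (h : isBorder s j) : j ≤ bmax s := by
  have := h.1
  exact Nat.le_findGreatest (by omega) h

lemma bmax_lt_length (s : List (Option Int)) (hs : s ≠ []) : bmax s < s.length := by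
  exact (isBorder_bmax s hs).1

lemma getD_take_lt (t : List (Option Int)) (i k : Nat) (h : k < i) :
    (t.take i).getD k none = t.getD k none := by
  rw [List.getD_eq_getElem?_getD, List.getD_eq_getElem?_getD, List.getElem?_take_of_lt h]

-- borders of a prefix that is itself a border
lemma isBorder_take_iff {s : List (Option Int)} {L j : Nat}
    (hL : isBorder s L) (hj : j < L) : (isBorder (s.take L) j ↔ isBorder s j) := by
  have hLlen := hL.1
  have hlen : (s.take L).length = L := by simp; omega
  unfold isBorder
  rw [hlen, hL.2, List.drop_drop]
  have harith : s.length - L + (L - j) = s.length - j := by omega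
  rw [harith]
  have htk : (s.drop (s.length - L)).take j = s.take j := by
    rw [← hL.2, List.take_take, min_eq_left (by omega)]
  rw [htk]
  constructor
  · rintro ⟨_, h2⟩; exact ⟨by omega, h2⟩
  · rintro ⟨_, h2⟩; exact ⟨hj, h2⟩

lemma isBorder_snoc_succ (s : List (Option Int)) (c : Option Int) (j : Nat) (hj : j < s.length) :
    isBorder (s ++ [c]) (j + 1) ↔ isBorder s j ∧ s.getD j none = c := by
  unfold isBorder
  have hlen : (s ++ [c]).length = s.length + 1 := by simp
  rw [hlen]
  have htk : (s ++ [c]).take (j + 1) = s.take j ++ [s[j]] := by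
    rw [List.take_append_of_le_length (by omega), List.take_add_one,
        List.getElem?_eq_getElem hj]
    rfl
  have hdr : (s ++ [c]).drop (s.length + 1 - (j + 1)) = s.drop (s.length - j) ++ [c] := by
    rw [show s.length + 1 - (j + 1) = s.length - j by omega,
        List.drop_append_of_le_length (by omega)]
  rw [htk, hdr]
  constructor
  · rintro ⟨_, h2⟩
    obtain ⟨h3, h4⟩ := List.append_inj' h2 rfl
    refine ⟨⟨hj, h3⟩, ?_⟩
    rw [List.getD_eq_getElem s none hj]
    exact List.singleton_injective h4
  · rintro ⟨⟨_, h3⟩, h4⟩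
    rw [List.getD_eq_getElem s none hj] at h4
    rw [h3, h4]
    exact ⟨by omega, rfl⟩

-- findGreatest skip
lemma findGreatest_skip {P : Nat → Prop} [DecidablePred P] {K L : Nat} (hKL : K ≤ L)
    (h : ∀ j, K < j → j ≤ L → ¬ P j) :
    Nat.findGreatest P L = Nat.findGreatest P K := by
  induction L with
  | zero => have : K = 0 := by omega
            subst this; rfl
  | succ L ih =>
    rcases Nat.eq_or_lt_of_le hKL with rfl | hlt
    · rfl
    · rw [Nat.findGreatest_succ, if_neg (h _ hlt (le_refl _))]
      exact ih (by omega) (fun j h1 h2 => h j h1 (by omega))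

lemma kmpFall_spec (t : List (Option Int)) (f : List Nat) (c : Option Int) (i : Nat)
    (hF : ∀ j, j < i → f.getD j 0 = bmax (t.take (j + 1))) (hi : i ≤ t.length) :
    ∀ k, (k = 0 ∨ isBorder (t.take i) k) →
    kmpFall t f c k =
      Nat.findGreatest (fun j => isBorder (t.take i) j ∧ (t.take i).getD j none = c ∧ 0 < j) k := by
  have hslen : (t.take i).length = i := by simp; omega
  intro k
  induction k using Nat.strong_induction_on with
  | _ k ih =>
    intro hk
    rw [kmpFall]
    by_cases hcase : k ≠ 0 ∧ ¬(t.getD k none == c)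
    · rw [if_pos hcase]
      obtain ⟨hk0, hne⟩ := hcase
      have hkb : isBorder (t.take i) k := hk.resolve_left hk0
      have hki : k < i := by have := hkb.1; omega
      have hfk : f.getD (k - 1) 0 = bmax (t.take k) := by
        have := hF (k - 1) (by omega)
        rwa [show k - 1 + 1 = k by omega] at this
      have htkk : t.take k = (t.take i).take k := by
        rw [List.take_take, min_eq_left (by omega)]
      have htklen : (t.take k).length = k := by simp; omega
      have htkne : t.take k ≠ [] := by
        intro hnil; rw [hnil] at htklen; simp at htklen; omega
      have hKlt : bmax (t.take k) < k := by
        have := bmax_lt_length (t.take k) htkne; omega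
      have hmin : min (f.getD (k - 1) 0) (k - 1) = bmax (t.take k) := by
        rw [hfk]; omega
      rw [hmin]
      have hKb : bmax (t.take k) = 0 ∨ isBorder (t.take i) (bmax (t.take k)) := by
        rcases Nat.eq_zero_or_pos (bmax (t.take k)) with h0 | hpos
        · exact Or.inl h0
        · right
          have hb : isBorder ((t.take i).take k) (bmax (t.take k)) := by
            rw [← htkk]; exact isBorder_bmax _ htkne
          exact (isBorder_take_iff hkb hKlt).mp hb
      rw [ih _ (by omega) hKb]
      symm
      refine findGreatest_skip (by omega) ?_
      rintro j h1 h2 ⟨hjb, hjc, hjpos⟩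
      rcases Nat.eq_or_lt_of_le h2 with rfl | hjk
      · rw [getD_take_lt t i j hki] at hjc
        rw [hjc] at hne
        simp at hne
      · have : isBorder ((t.take i).take k) j := (isBorder_take_iff hkb hjk).mpr hjb
        rw [← htkk] at this
        have := le_bmax_of_isBorder this
        omega
    · rw [if_neg hcase]
      rcases Nat.eq_zero_or_pos k with rfl | hpos
      · rfl
      · have hk0 : k ≠ 0 := by omega
        have hc : t.getD k none == c := by
          by_cases h : t.getD k none == c
          · exact h
          · exact absurd ⟨hk0, h⟩ hcase
        have hkb : isBorder (t.take i) k := hk.resolve_left hk0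
        have hki : k < i := by have := hkb.1; omega
        have hceq : (t.take i).getD k none = c := by
          rw [getD_take_lt t i k hki]; exact eq_of_beq hc
        exact (Nat.le_antisymm (Nat.findGreatest_le k)
          (Nat.le_findGreatest (le_refl _) ⟨hkb, hceq, hpos⟩)).symm

lemma kmpStep_spec (t : List (Option Int)) (f : List Nat) (i : Nat)
    (hF : ∀ j, j < i → f.getD j 0 = bmax (t.take (j + 1))) (_hlen : f.length = i)
    (h1 : 1 ≤ i) (h2 : i < t.length) :
    kmpStep t f i = bmax (t.take (i + 1)) := by
  have hslen : (t.take i).length = i := by simp; omega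
  have hsne : t.take i ≠ [] := by
    intro hnil; rw [hnil] at hslen; simp at hslen; omega
  set s := t.take i with hs
  set c := t.getD i none with hc
  have hk0 : f.getD (i - 1) 0 = bmax s := by
    have := hF (i - 1) (by omega)
    rwa [show i - 1 + 1 = i by omega] at this
  have hfall := kmpFall_spec t f c i hF (by omega) (bmax s) (Or.inr (isBorder_bmax s hsne))
  set P := fun j => isBorder s j ∧ s.getD j none = c ∧ 0 < j with hP
  set r := Nat.findGreatest P (bmax s) with hr
  obtain ⟨hrle, hrP, hrmax⟩ := (Nat.findGreatest_eq_iff).mp hr.symm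
  have hrlt : r < i := by
    have := bmax_lt_length s hsne; omega
  have htsucc : t.take (i + 1) = s ++ [c] := by
    rw [List.take_add_one, List.getElem?_eq_getElem (by omega : i < t.length)]
    have : t[i] = c := (List.getD_eq_getElem t none (by omega)).symm
    rw [this]
    rfl
  have hsnocne : s ++ [c] ≠ [] := by simp
  have hgr : t.getD r none = s.getD r none := (getD_take_lt t i r hrlt).symm
  unfold kmpStep
  rw [hk0, hfall]
  show (if (t.getD i none == t.getD r none) = true then r + 1 else r) = bmax (t.take (i + 1))
  rw [htsucc, ← hc]
  by_cases hif : (c == t.getD r none) = true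
  · rw [if_pos hif]
    have hceq : s.getD r none = c := by rw [← hgr]; exact (eq_of_beq hif).symm
    have hrb : isBorder s r := by
      rcases Nat.eq_zero_or_pos r with h0 | hpos
      · rw [h0]; exact isBorder_zero s hsne
      · exact (hrP (by omega)).1
    apply Nat.le_antisymm
    · exact le_bmax_of_isBorder ((isBorder_snoc_succ s c r (by omega)).mpr ⟨hrb, hceq⟩)
    · have hMb := isBorder_bmax (s ++ [c]) hsnocne
      rcases hM : bmax (s ++ [c]) with _ | j
      · omega
      · rw [hM] at hMb
        have hjlt : j < s.length := by
          have := hMb.1; simp at this; omega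
        obtain ⟨hjb, hjc⟩ := (isBorder_snoc_succ s c j hjlt).mp hMb
        by_cases hjr : j ≤ r
        · omega
        · rcases Nat.eq_zero_or_pos j with rfl | hjpos
          · omega
          · exact absurd ⟨hjb, hjc, hjpos⟩
              (hrmax (by omega) (le_bmax_of_isBorder hjb))
  · rw [if_neg hif]
    have hr0 : r = 0 := by
      by_contra hne
      obtain ⟨_, hceq, _⟩ := hrP hne
      rw [← hgr] at hceq
      rw [hceq] at hif
      simp at hif
    symm
    have hMb := isBorder_bmax (s ++ [c]) hsnocne
    rcases hM : bmax (s ++ [c]) with _ | j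
    · omega
    · exfalso
      rw [hM] at hMb
      have hjlt : j < s.length := by
        have := hMb.1; simp at this; omega
      obtain ⟨hjb, hjc⟩ := (isBorder_snoc_succ s c j hjlt).mp hMb
      rcases Nat.eq_zero_or_pos j with rfl | hjpos
      · rw [hr0] at hgr hif
        rw [← hgr] at hjc
        rw [hjc] at hif
        simp at hif
      · exact absurd ⟨hjb, hjc, hjpos⟩
          (hrmax (by omega) (le_bmax_of_isBorder hjb))

lemma kmpAux_spec (t : List (Option Int)) :
    ∀ steps f i, f.length = i → 1 ≤ i → i + steps = t.length →
    (∀ j, j < i → f.getD j 0 = bmax (t.take (j + 1))) →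
    ∀ j, j < t.length → (kmpAux t f i steps).getD j 0 = bmax (t.take (j + 1)) := by
  intro steps
  induction steps with
  | zero => intro f i hlen h1 hsum hF j hj; exact hF j (by omega)
  | succ steps ih =>
    intro f i hlen h1 hsum hF j hj
    refine ih (f ++ [kmpStep t f i]) (i + 1) (by simp [hlen]) (by omega) (by omega) ?_ j hj
    intro j hji
    rcases Nat.lt_or_ge j i with h | h
    · rw [List.getD_eq_getElem?_getD, List.getElem?_append_left (by omega),
          ← List.getD_eq_getElem?_getD, hF j h]
    · have hj' : j = i := by omega
      subst hj'
      rw [List.getD_eq_getElem?_getD, List.getElem?_append_right (by omega)]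
      simp [hlen]
      exact kmpStep_spec t f j hF hlen h1 (by omega)

lemma kmpBuild_spec (t : List (Option Int)) (ht : t ≠ []) :
    ∀ j, j < t.length → (kmpBuild t).getD j 0 = bmax (t.take (j + 1)) := by
  have hlen : 1 ≤ t.length := List.length_pos_of_ne_nil ht
  refine kmpAux_spec t (t.length - 1) [0] 1 rfl (le_refl _) (by omega) ?_
  intro j hj
  have hj0 : j = 0 := by omega
  subst hj0
  have h1 : (t.take 1).length = 1 := by simp; omega
  simp [bmax, h1]

-- descending list L, L-1, …, 1
def downFrom : Nat → List Nat
  | 0 => []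
  | L + 1 => (L + 1) :: downFrom L

lemma downFrom_filterMap_skip {g : Nat → Option Int} {K L : Nat} (hKL : K ≤ L)
    (h : ∀ j, K < j → j ≤ L → g j = none) :
    (downFrom L).filterMap g = (downFrom K).filterMap g := by
  induction L with
  | zero => have : K = 0 := by omega
            subst this; rfl
  | succ L ih =>
    rcases Nat.eq_or_lt_of_le hKL with rfl | hlt
    · rfl
    · rw [downFrom, List.filterMap_cons, h _ hlt (le_refl _)]
      exact ih (by omega) (fun j h1 h2 => h j h1 (by omega))

-- what the chain loop emits at L
def emitB (t : List (Option Int)) (L : Nat) : Option Int :=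
  if isBorder t L ∧ L % 2 = 0 ∧ 0 < L then some ((L / 2 : Nat) : Int) else none

lemma hmChain_spec (t : List (Option Int)) (f : List Nat)
    (hF : ∀ j, j < t.length → f.getD j 0 = bmax (t.take (j + 1))) :
    ∀ L, (L = 0 ∨ isBorder t L) → hmChain f L = (downFrom L).filterMap (emitB t) := by
  intro L
  induction L using Nat.strong_induction_on with
  | _ L ih =>
    intro hL
    rw [hmChain]
    rcases Nat.eq_zero_or_pos L with rfl | hpos
    · rfl
    · have hLb : isBorder t L := hL.resolve_left (by omega)
      have hLlt : L < t.length := hLb.1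
      rw [if_neg (by omega)]
      have hfL : f.getD (L - 1) 0 = bmax (t.take L) := by
        have := hF (L - 1) (by omega)
        rwa [show L - 1 + 1 = L by omega] at this
      have htLlen : (t.take L).length = L := by simp; omega
      have htLne : t.take L ≠ [] := by
        intro hnil; rw [hnil] at htLlen; simp at htLlen; omega
      have hKlt : bmax (t.take L) < L := by
        have := bmax_lt_length (t.take L) htLne; omega
      have hmin : min (f.getD (L - 1) 0) (L - 1) = bmax (t.take L) := by
        rw [hfL]; omega
      rw [hmin]
      set K := bmax (t.take L) with hK
      have hKb : K = 0 ∨ isBorder t K := by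
        rcases Nat.eq_zero_or_pos K with h0 | hKpos
        · exact Or.inl h0
        · exact Or.inr ((isBorder_take_iff hLb hKlt).mp (isBorder_bmax (t.take L) htLne))
      rw [ih K (by omega) hKb]
      -- unfold the head of downFrom L and skip the borderless stretch (K, L-1]
      obtain ⟨L', rfl⟩ : ∃ L', L = L' + 1 := ⟨L - 1, by omega⟩
      rw [downFrom, List.filterMap_cons]
      have hskip : (downFrom L').filterMap (emitB t) = (downFrom K).filterMap (emitB t) := by
        refine downFrom_filterMap_skip (by omega) ?_
        intro j h1 h2
        unfold emitB
        rw [if_neg]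
        rintro ⟨hjb, _, hjpos⟩
        have : isBorder (t.take (L' + 1)) j :=
          (isBorder_take_iff hLb (by omega)).mpr hjb
        have := le_bmax_of_isBorder this
        omega
      have hemit : emitB t (L' + 1) =
          if (L' + 1) % 2 = 0 then some (((L' + 1) / 2 : Nat) : Int) else none := by
        unfold emitB
        by_cases hpar : (L' + 1) % 2 = 0
        · rw [if_pos ⟨hLb, hpar, by omega⟩, if_pos hpar]
        · rw [if_neg (by tauto), if_neg hpar]
      rw [hemit, hskip]
      by_cases hpar : (L' + 1) % 2 = 0
      · rw [if_pos hpar, if_pos hpar]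
        rfl
      · rw [if_neg hpar, if_neg hpar]
        rfl

-- B's separator construction, named for the proofs
def tOf (nums : List Int) : List (Option Int) :=
  nums.map some ++ [none] ++ (nums.map some).reverse

lemma length_tOf (nums : List Int) : (tOf nums).length = 2 * nums.length + 1 := by
  simp [tOf]; omega

lemma tOf_ne_nil (nums : List Int) : tOf nums ≠ [] := by
  intro h
  have := congrArg List.length h
  rw [length_tOf] at this
  simp at this

-- every nonzero border of t lies inside nums (the separator occurs only once)
lemma isBorder_tOf_le (nums : List Int) (L : Nat) (hL : isBorder (tOf nums) L) :
    L ≤ nums.length := by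
  by_contra hgt
  rw [not_le] at hgt
  have hlen := length_tOf nums
  have hLlt : L < 2 * nums.length + 1 := by rw [← hlen]; exact hL.1
  set n := nums.length with hn
  have h2 := hL.2
  have hcons : tOf nums = nums.map some ++ (none :: (nums.map some).reverse) := by
    simp [tOf]
  have hlhs : (List.take L (tOf nums))[n]? = some none := by
    rw [List.getElem?_take_of_lt (by omega), hcons,
        List.getElem?_append_right (by simp; omega),
        show n - (List.map some nums).length = 0 by simp; omega]
    rfl
  have hrhs : ∃ v, ((tOf nums).drop ((tOf nums).length - L))[n]? = some (some v) := by
    rw [List.getElem?_drop, hlen, hcons,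
        List.getElem?_append_right (by simp; omega)]
    have hidx : 2 * n + 1 - L + n - (nums.map some).length = 2 * n + 1 - L := by
      simp; omega
    rw [hidx]
    have hidx2 : 2 * n + 1 - L = (2 * n - L) + 1 := by omega
    rw [hidx2]
    simp only [List.getElem?_cons_succ]
    have hin : 2 * n - L < ((nums.map some).reverse).length := by simp; omega
    rw [List.getElem?_eq_getElem hin]
    have hmem : ((nums.map some).reverse)[2 * n - L] ∈ (nums.map some).reverse :=
      List.getElem_mem hin
    rw [List.mem_reverse, List.mem_map] at hmem
    obtain ⟨v, _, hv⟩ := hmem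
    exact ⟨v, by rw [← hv]⟩
  obtain ⟨v, hrhs⟩ := hrhs
  rw [h2, hrhs] at hlhs
  simp at hlhs

-- inside nums, borders of t are exactly the palindromic prefixes of nums
lemma isBorder_tOf_iff (nums : List Int) (L : Nat) (_h1 : 0 < L) (h2 : L ≤ nums.length) :
    isBorder (tOf nums) L ↔ nums.take L = (nums.take L).reverse := by
  set n := nums.length with hn
  have hlen := length_tOf nums
  have htk : (tOf nums).take L = (nums.map some).take L := by
    unfold tOf
    rw [List.take_append_of_le_length (by simp; omega),
        List.take_append_of_le_length (by simp; omega)]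
  have hdr : (tOf nums).drop ((tOf nums).length - L) = ((nums.map some).take L).reverse := by
    rw [hlen]
    unfold tOf
    rw [List.drop_append, List.drop_append]
    have e1 : List.drop (2 * n + 1 - L) (nums.map some) = [] :=
      List.drop_eq_nil_of_le (by simp; omega)
    have e2 : List.drop (2 * n + 1 - L - (nums.map some).length) [(none : Option Int)] = [] :=
      List.drop_eq_nil_of_le (by simp; omega)
    rw [e1, e2]
    simp only [List.nil_append]
    rw [List.reverse_take]
    congr 1
    simp
    omega
  unfold isBorder
  rw [htk, hdr, hlen]
  have hml := List.map_take (f := (some : Int → Option Int)) (l := nums) (i := L)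
  constructor
  · rintro ⟨_, hb⟩
    rw [← hml, ← List.map_reverse] at hb
    exact List.map_injective_iff.mpr (Option.some_injective Int) hb
  · intro hb
    refine ⟨by omega, ?_⟩
    rw [← hml, ← List.map_reverse]
    exact congrArg (List.map some) hb

-- A's slice test at x is the even-palindromic-prefix test at 2x
lemma slice_cond_iff (nums : List Int) (x : Nat) (_h1 : 1 ≤ x) (h2 : 2 * x ≤ nums.length) :
    (PySem.List.slice nums (some 0) (some (x : Int)) =
      (PySem.List.slice nums (some (x : Int)) (some (2 * (x : Int)))).reverse)
    ↔ nums.take (2 * x) = (nums.take (2 * x)).reverse := by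
  rw [PySem.List.slice_zero_start, PySem.List.slice_to_natCast]
  have hc : (2 * (x : Int)) = (((2 * x : Nat)) : Int) := by push_cast; ring
  rw [hc, PySem.List.slice_natCast, show 2 * x - x = x by omega]
  set a := nums.take x with ha
  set b := (nums.drop x).take x with hb
  have hta : (nums.take (2 * x)) = a ++ b := by
    rw [show 2 * x = x + x by omega, List.take_add]
  have hla : a.length = x := by simp [ha]; omega
  have hlb : b.length = x := by simp [hb]; omega
  rw [hta, List.reverse_append]
  constructor
  · intro h
    rw [h, List.reverse_reverse]
  · intro h
    exact (List.append_inj' h (by rw [hlb]; simp [hla])).1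

lemma mem_downFrom {j K : Nat} : j ∈ downFrom K ↔ 1 ≤ j ∧ j ≤ K := by
  induction K with
  | zero => simp [downFrom]; omega
  | succ K ih => rw [downFrom]; simp [ih]; omega

lemma pyRange_downFrom (K : Nat) :
    PySem.List.pyRange (K : Int) 0 (-1) = (downFrom K).map (fun j : Nat => (j : Int)) := by
  induction K with
  | zero => exact PySem.List.pyRange_neg_one_eq_nil (by omega)
  | succ K ih =>
    rw [PySem.List.pyRange_neg_one_cons (by push_cast; omega),
        show ((K + 1 : Nat) : Int) - 1 = (K : Int) by push_cast; ring, ih]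
    rfl

lemma filterMap_cons' (g : Nat → Option Int) (a : Nat) (l : List Nat) :
    (a :: l).filterMap g = (g a).toList ++ l.filterMap g := by
  cases h : g a <;> simp [h]

lemma filter_map_cast (l : List Nat) (p : Int → Prop) [DecidablePred p] :
    ((l.map (fun j : Nat => (j : Int))).filter (fun x => decide (p x)))
      = l.filterMap (fun j => if p ((j : Nat) : Int) then some ((j : Int)) else none) := by
  induction l with
  | nil => rfl
  | cons a l ih =>
    rw [List.map_cons, filterMap_cons']
    by_cases h : p ((a : Nat) : Int)
    · rw [List.filter_cons_of_pos (by simpa using h), if_pos h]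
      simp [ih]
    · rw [List.filter_cons_of_neg (by simpa using h), if_neg h]
      simp [ih]

-- only even positions are ever emitted: compress downFrom n to downFrom (n/2)
lemma filterMap_even (g : Nat → Option Int) (hodd : ∀ j, j % 2 = 1 → g j = none) :
    ∀ K, (downFrom K).filterMap g = (downFrom (K / 2)).filterMap (fun x => g (2 * x)) := by
  intro K
  induction K using Nat.strong_induction_on with
  | _ K ih =>
    match K with
    | 0 => rfl
    | 1 =>
      show List.filterMap g [1] = []
      simp [hodd 1 rfl]
    | (K + 2) =>
      rw [downFrom, downFrom, filterMap_cons', filterMap_cons', ih K (by omega),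
          show (K + 2) / 2 = K / 2 + 1 by omega, downFrom, filterMap_cons']
      rcases Nat.even_or_odd K with he | ho
      · have hK : K % 2 = 0 := Nat.even_iff.mp he
        rw [hodd (K + 1) (by omega), show 2 * (K / 2 + 1) = K + 2 by omega]
        simp
      · have hK : K % 2 = 1 := Nat.odd_iff.mp ho
        rw [hodd (K + 2) (by omega), show 2 * (K / 2 + 1) = K + 1 by omega]
        simp

-- ===== VERDICT (by name: the statement is the Claim_ definition above) =====
theorem horizontal_mirror_spec : Claim_equal_horizontal_mirror := by
  intro rows _
  unfold Spec_horizontal_mirror horizontal_mirror horizontal_mirror_alt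
  simp only []
  set nums := rows.map hmNum with hnums
  set n := nums.length with hn
  -- A side: the yield loop is a filter over the countdown range
  rw [show (nums.length : Int) = ((n : Nat) : Int) by rw [hn],
      show PySem.Int.floordiv ((n : Nat) : Int) 2 = ((n / 2 : Nat) : Int) from
        PySem.Int.floordiv_natCast n 2,
      PySem.List.foldl_append_ite_eq_filter, List.nil_append,
      pyRange_downFrom, filter_map_cast]
  -- B side: the chain is the filterMap of emitB over all positions
  have hlt := length_tOf nums
  have htne := tOf_ne_nil nums
  have hF := kmpBuild_spec (tOf nums) htne
  have htop : (kmpBuild (tOf nums)).getD ((tOf nums).length - 1) 0 = bmax (tOf nums) := by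
    rw [hF ((tOf nums).length - 1) (by omega),
        show (tOf nums).length - 1 + 1 = (tOf nums).length by omega, List.take_length]
  have hbody : nums.map some ++ [none] ++ (nums.map some).reverse = tOf nums := rfl
  rw [hbody, htop,
      hmChain_spec (tOf nums) (kmpBuild (tOf nums)) hF (bmax (tOf nums))
        (Or.inr (isBorder_bmax (tOf nums) htne))]
  have hble : bmax (tOf nums) ≤ n :=
    isBorder_tOf_le nums _ (isBorder_bmax (tOf nums) htne)
  have hext : (downFrom n).filterMap (emitB (tOf nums)) =
      (downFrom (bmax (tOf nums))).filterMap (emitB (tOf nums)) := by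
    refine downFrom_filterMap_skip hble ?_
    intro j hj1 hj2
    unfold emitB
    rw [if_neg]
    rintro ⟨hjb, _, _⟩
    have := le_bmax_of_isBorder hjb
    omega
  rw [← hext,
      filterMap_even (emitB (tOf nums))
        (by intro j hj; unfold emitB; rw [if_neg]; rintro ⟨_, hp, _⟩; omega) n]
  refine List.filterMap_congr ?_
  intro j hj
  obtain ⟨hj1, hj2⟩ := mem_downFrom.mp hj
  have h2j : 2 * j ≤ n := by omega
  -- (goal already in if-form)
  unfold emitB
  have hiff : (PySem.List.slice nums (some 0) (some ((j : Nat) : Int)) =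
      (PySem.List.slice nums (some ((j : Nat) : Int)) (some (2 * ((j : Nat) : Int)))).reverse)
      ↔ isBorder (tOf nums) (2 * j) := by
    rw [slice_cond_iff nums j hj1 h2j, isBorder_tOf_iff nums (2 * j) (by omega) h2j]
  by_cases hc : isBorder (tOf nums) (2 * j)
  · rw [if_pos (hiff.mpr hc), if_pos ⟨hc, by omega, by omega⟩,
        show 2 * j / 2 = j by omega]
  · rw [if_neg (fun h => hc (hiff.mp h)), if_neg (by tauto)]
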